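-- pv_equiv track=rewrite | github.com/gofflab/biolib | src/seqlib/stats.py | iter_window_index_step
-- ===== SOURCE A (Python) =====
-- def iter_window_index_step(x, size, step, minsize=0):
--     """Iterate fixed-step sliding-window index ranges over a sorted value sequence.
--
--     Advances a window of fixed width ``size`` in increments of ``step``
--     along the value axis, yielding index and value bounds for each
--     window position that contains at least ``minsize`` points.
--
--     Args:
--         x: A sorted (ascending) list of numeric values.
--         size: The width of each window in the same units as ``x``.
--         step: The distance to advance the window centre between successive
--             yields.
--         minsize: Minimum number of points that must be inside the window
--             for it to be yielded.  Defaults to 0.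
--
--     Yields:
--         4-tuples ``(lowi, highi, low, high)`` where ``lowi`` and
--         ``highi`` are the inclusive index bounds of the current window
--         in ``x``, and ``low`` / ``high`` are the value boundaries.
--     """
--     vlen = len(x)
--     start = x[0]
--     end = x[-1]
--
--     low = start
--     high = start + size
--     i = 1
--
--     lowi = 0
--     highi = 0
--
--     # move up high boundary
--     while highi+1 < vlen and x[highi+1] < high:
--         highi += 1
--
--     while highi < vlen and high < end:
--         if highi - lowi >= minsize:
--             yield lowi, highi, low, high
--         low = start + i * step
--         high = low + size
--         i += 1
--
--         # move up low boundary
--         while lowi < vlen and x[lowi] < low: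
--             lowi += 1
--
--         # move up high boundary
--         while highi+1 < vlen and x[highi+1] < high:
--             highi += 1
-- ===== SOURCE B (Python) =====
-- from bisect import bisect_left
--
-- def iter_window_index_step(x, size, step, minsize=0):
--     """Stateless re-implementation: count the windows in closed form, then
--     compute each window's index bounds independently with bisect_left."""
--     start, end = x[0], x[-1]
--     span = end - start - size
--     nwin = 0 if span <= 0 else -(-span // step)
--     for i in range(nwin):
--         low = start + i * step
--         high = low + size
--         lowi = bisect_left(x, low)
--         highi = max(0, bisect_left(x, high) - 1)
--         if highi - lowi >= minsize:
--             yield lowi, highi, low, high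
-- ===== Notes on version B (the rewrite author's own statement) =====
-- stated objective: alternative
-- what changed: A's single stateful sweep carrying four loop variables and three hand-rolled pointer-advance while-loops is replaced by a stateless formulation: the number of windows is computed in closed form by ceiling division and each window's index bounds are computed independently with stdlib bisect_left.
-- outside the precondition, e.g. on iter_window_index_step([5, -6, 0, 3, -6, 6], 0, 1, -1): A returns [(0, 4, 5, 5)], B returns [(5, 4, 5, 5)]
import Mathlib
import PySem

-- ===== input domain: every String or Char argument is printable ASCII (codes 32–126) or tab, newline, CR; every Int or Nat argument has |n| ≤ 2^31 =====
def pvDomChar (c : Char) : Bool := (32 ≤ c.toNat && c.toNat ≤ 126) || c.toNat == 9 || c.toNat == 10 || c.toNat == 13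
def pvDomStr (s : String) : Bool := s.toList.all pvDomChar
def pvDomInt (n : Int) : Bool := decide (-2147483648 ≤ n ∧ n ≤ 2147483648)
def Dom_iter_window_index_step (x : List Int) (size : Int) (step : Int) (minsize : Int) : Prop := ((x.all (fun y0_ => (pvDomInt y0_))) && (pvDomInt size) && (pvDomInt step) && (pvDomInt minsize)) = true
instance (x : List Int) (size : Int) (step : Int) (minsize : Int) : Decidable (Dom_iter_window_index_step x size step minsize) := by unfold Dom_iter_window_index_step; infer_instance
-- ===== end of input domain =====

-- B replaces A's stateful sweep (four loop variables, three hand-rolled pointer scans) by a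
-- stateless formulation: a closed-form window count plus an independent bisect_left per window
-- (objective: alternative). A is a generator; neither version mutates its arguments; the ports
-- return the list of yielded tuples.

-- ===== PORT A =====
-- inner loop: while lowi < vlen and x[lowi] < low: lowi += 1
def loopLowA (x : List Int) (low : Int) (lowi : Nat) : Nat :=
  if h : lowi < x.length ∧ x.getD lowi 0 < low then
    loopLowA x low (lowi + 1)
  else lowi
termination_by x.length - lowi
decreasing_by omega

-- inner loop: while highi+1 < vlen and x[highi+1] < high: highi += 1
def loopHighA (x : List Int) (high : Int) (highi : Nat) : Nat :=
  if h : highi + 1 < x.length ∧ x.getD (highi + 1) 0 < high then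
    loopHighA x high (highi + 1)
  else highi
termination_by x.length - highi
decreasing_by omega

-- outer while loop of A; fuel only makes the (possibly diverging) Python loop total,
-- it is chosen large enough for every input admitted by Pre_.
def outerA (x : List Int) (size step minsize endv start : Int) :
    Nat → Int → Int → Int → Nat → Nat → List (Int × Int × Int × Int)
  | 0, _, _, _, _, _ => []
  | f + 1, low, high, i, lowi, highi =>
    if highi < x.length ∧ high < endv then
      (if (highi : Int) - (lowi : Int) ≥ minsize then [((lowi : Int), (highi : Int), low, high)] else []) ++
      (outerA x size step minsize endv start f (start + i * step) (start + i * step + size) (i + 1)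
         (loopLowA x (start + i * step) lowi) (loopHighA x (start + i * step + size) highi))
    else []

def iter_window_index_step (x : List Int) (size : Int) (step : Int) (minsize : Int) : List (Int × Int × Int × Int) :=
  match x with
  | [] => []   -- Python raises IndexError on x[0]; excluded by Pre_
  | _ :: _ =>
    outerA x size step minsize (x.getD (x.length - 1) 0) (x.getD 0 0)
      ((x.getD (x.length - 1) 0 - x.getD 0 0 - size).toNat + 2)
      (x.getD 0 0) (x.getD 0 0 + size) 1 0 (loopHighA x (x.getD 0 0 + size) 0)

-- ===== PORT B =====
-- Source B: nwin = 0 if span <= 0 else -(-span // step); then one bisect pair per window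
def iter_window_index_step_alt (x : List Int) (size : Int) (step : Int) (minsize : Int) : List (Int × Int × Int × Int) :=
  match x with
  | [] => []   -- Python raises IndexError on x[0]; excluded by Pre_
  | _ :: _ =>
    let start := x.getD 0 0
    let endv := x.getD (x.length - 1) 0
    let span := endv - start - size
    let nwin : Int := if span ≤ 0 then 0 else -(PySem.Int.floordiv (-span) step)
    (PySem.List.pyRange 0 nwin 1).flatMap (fun i =>
      let low := start + i * step
      let high := low + size
      let lowi : Int := (PySem.List.bisectLeft x low : Int)
      let highi : Int := max 0 ((PySem.List.bisectLeft x high : Int) - 1)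
      if highi - lowi ≥ minsize then [(lowi, highi, low, high)] else [])

-- ===== PRECONDITION & SPEC =====
-- Pre_ excludes: the empty list (A raises IndexError); step ≤ 0 when end > start+size, where
-- A's while-loop never terminates; and unsorted x with end > start+size, where the docstring's
-- 'sorted ascending' precondition is violated and A's linear-scan stopping points are accidental
-- (with end ≤ start+size the loop body never runs, so unsorted x is admitted there).
def Pre_iter_window_index_step (x : List Int) (size : Int) (step : Int) (minsize : Int) : Prop :=
  x ≠ [] ∧ (x.getD (x.length - 1) 0 ≤ x.getD 0 0 + size ∨
    (List.Pairwise (· ≤ ·) x ∧ 0 < step))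
instance (x : List Int) (size : Int) (step : Int) (minsize : Int) : Decidable (Pre_iter_window_index_step x size step minsize) := by unfold Pre_iter_window_index_step; infer_instance

def pvWitness_iter_window_index_step : List Int × Int × Int × Int := ([1, 3, 4, 7, 9], 3, 2, 1)

def Spec_iter_window_index_step (x : List Int) (size : Int) (step : Int) (minsize : Int) (out : List (Int × Int × Int × Int)) : Prop := out = iter_window_index_step_alt x size step minsize
instance (x : List Int) (size : Int) (step : Int) (minsize : Int) (out : List (Int × Int × Int × Int)) : Decidable (Spec_iter_window_index_step x size step minsize out) := by unfold Spec_iter_window_index_step; infer_instance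

-- ===== CLAIM (what is proved, stated in full; the proofs are below) =====
def Claim_equal_iter_window_index_step : Prop := ∀ (x : List Int) (size : Int) (step : Int) (minsize : Int), Dom_iter_window_index_step x size step minsize → Pre_iter_window_index_step x size step minsize → Spec_iter_window_index_step x size step minsize (iter_window_index_step x size step minsize)

-- ===== LEMMAS AND PROOFS =====

-- characterisation of A's linear low-pointer advance (no sortedness needed)
lemma loopLowA_spec (x : List Int) (v : Int) :
    ∀ lowi : Nat, lowi ≤ x.length →
      lowi ≤ loopLowA x v lowi ∧ loopLowA x v lowi ≤ x.length ∧
      (∀ k, lowi ≤ k → k < loopLowA x v lowi → x.getD k 0 < v) ∧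
      (loopLowA x v lowi < x.length → ¬ x.getD (loopLowA x v lowi) 0 < v) := by
  intro lowi
  induction lowi using loopLowA.induct x v with
  | case1 lowi h ih =>
    intro _
    rw [loopLowA, dif_pos h]
    obtain ⟨ih1, ih2, ih3, ih4⟩ := ih h.1
    refine ⟨by omega, ih2, ?_, ih4⟩
    intro k hk1 hk2
    rcases Nat.eq_or_lt_of_le hk1 with rfl | h'
    · exact h.2
    · exact ih3 k h' hk2
  | case2 lowi h =>
    intro hle
    rw [loopLowA, dif_neg h]
    exact ⟨Nat.le_refl _, hle, fun k hk1 hk2 => absurd hk1 (by omega),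
      fun hlt hv => h ⟨hlt, hv⟩⟩

-- on a sorted list the linear scan started at lo lands at max lo (bisect_left x v)
lemma loopLowA_eq_max (x : List Int) (v : Int) (hs : List.Pairwise (· ≤ ·) x)
    (lo : Nat) (hlo : lo ≤ x.length) :
    loopLowA x v lo = max lo (PySem.List.bisectLeft x v) := by
  obtain ⟨l1, l2, l3, l4⟩ := loopLowA_spec x v lo hlo
  obtain ⟨b1, b2, b3⟩ := PySem.List.bisectLeft_spec x v hs
  set r := loopLowA x v lo with hr
  set b := PySem.List.bisectLeft x v with hb
  rcases Nat.lt_trichotomy r (max lo b) with h | h | h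
  · -- r < max lo b: then r < b ≤ len, so x[r] < v, contradicting l4
    exfalso
    have hrb : r < b := by omega
    have hrlen : r < x.length := by omega
    exact l4 hrlen (by rw [List.getD_eq_getElem x 0 hrlen]; exact b2 r hrlen hrb)
  · exact h
  · -- r > max lo b: x[max lo b] < v by l3, but v ≤ x[max lo b] by b3
    exfalso
    have hklen : max lo b < x.length := by omega
    have h1 := l3 (max lo b) (by omega) h
    have h2 := b3 (max lo b) hklen (by omega)
    rw [List.getD_eq_getElem x 0 hklen] at h1
    omega

-- bisect_left is monotone in the sought value
lemma bisectLeft_mono (x : List Int) (hs : List.Pairwise (· ≤ ·) x)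
    {v w : Int} (hvw : v ≤ w) :
    PySem.List.bisectLeft x v ≤ PySem.List.bisectLeft x w := by
  obtain ⟨bv1, bv2, bv3⟩ := PySem.List.bisectLeft_spec x v hs
  obtain ⟨bw1, bw2, bw3⟩ := PySem.List.bisectLeft_spec x w hs
  by_contra hlt
  have h1 : PySem.List.bisectLeft x w < x.length := by omega
  have h2 := bv2 _ h1 (by omega)
  have h3 := bw3 _ h1 (Nat.le_refl _)
  omega

-- bisect_left at the first element of a sorted nonempty list is 0
lemma bisectLeft_first (x : List Int) (hs : List.Pairwise (· ≤ ·) x) (hne : 0 < x.length) :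
    PySem.List.bisectLeft x (x.getD 0 0) = 0 := by
  obtain ⟨b1, b2, b3⟩ := PySem.List.bisectLeft_spec x (x.getD 0 0) hs
  by_contra h
  have := b2 0 hne (by omega)
  rw [List.getD_eq_getElem x 0 hne] at this
  omega

-- A's high-pointer advance is the low-pointer advance started one to the right, minus one
lemma loopHighA_succ (x : List Int) (v : Int) :
    ∀ h : Nat, loopHighA x v h + 1 = loopLowA x v (h + 1) := by
  intro h
  induction h using loopHighA.induct x v with
  | case1 h hc ih =>
    rw [loopHighA, dif_pos hc, loopLowA, dif_pos hc, ih]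
  | case2 h hc =>
    rw [loopHighA, dif_neg hc, loopLowA, dif_neg hc]

-- A's guard 'high < end' holds iff the window index is below B's closed-form count
lemma guard_iff_lt_nwin (span step : Int) (hstep : 0 < step) (k : Int) (hk : 0 ≤ k) :
    k * step < span ↔ k < (if span ≤ 0 then 0 else -(PySem.Int.floordiv (-span) step)) := by
  by_cases hsp : span ≤ 0
  · rw [if_pos hsp]
    constructor
    · intro h; nlinarith
    · omega
  · rw [if_neg hsp]
    have hfd : PySem.Int.floordiv (-span) step = (-span) / step := by
      unfold PySem.Int.floordiv
      rw [Int.fdiv_eq_ediv]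
      simp [le_of_lt hstep]
    rw [hfd]
    have hle : -k ≤ (-span) / step ↔ (-k) * step ≤ -span := Int.le_ediv_iff_mul_le hstep
    constructor
    · intro h
      by_contra hc
      have : -k ≤ (-span) / step := by omega
      have := hle.mp this
      nlinarith
    · intro h
      by_contra hc
      have : (-k) * step ≤ -span := by nlinarith
      have := hle.mpr this
      omega

-- B's window count is at most span (so A's fuel covers all iterations)
lemma nwin_le_span (span step : Int) (hstep : 0 < step) :
    (if span ≤ 0 then 0 else -(PySem.Int.floordiv (-span) step)) ≤ max span 0 := by
  by_cases hsp : span ≤ 0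
  · simp [hsp]
  · rw [if_neg hsp]
    have hfd : PySem.Int.floordiv (-span) step = (-span) / step := by
      unfold PySem.Int.floordiv
      rw [Int.fdiv_eq_ediv]
      simp [le_of_lt hstep]
    rw [hfd]
    have hle : -span ≤ (-span) / step ↔ (-span) * step ≤ -span :=
      Int.le_ediv_iff_mul_le hstep
    have : (-span) * step ≤ -span := by nlinarith
    have := hle.mpr this
    omega

-- the invariant step: A's outer loop, started at window k with pointers equal to B's
-- per-window bisect values, produces exactly B's windows k, k+1, …, nwin-1
lemma outer_eq_flatMap (x : List Int) (size step minsize endv start : Int)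
    (hs : List.Pairwise (· ≤ ·) x) (hstep : 0 < step) (hlen : 0 < x.length)
    (hstart : start = x.getD 0 0) :
    ∀ (f : Nat) (k : Int), 0 ≤ k →
      (if endv - start - size ≤ 0 then 0 else -(PySem.Int.floordiv (-(endv - start - size)) step)) ≤ k + (f : Int) →
      outerA x size step minsize endv start f (start + k * step) (start + k * step + size) (k + 1)
        (PySem.List.bisectLeft x (start + k * step))
        (PySem.List.bisectLeft x (start + k * step + size) - 1) =
      (PySem.List.pyRange k (if endv - start - size ≤ 0 then 0 else -(PySem.Int.floordiv (-(endv - start - size)) step)) 1).flatMap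
        (fun i =>
          if (max 0 ((PySem.List.bisectLeft x (start + i * step + size) : Int) - 1)) -
              ((PySem.List.bisectLeft x (start + i * step) : Int)) ≥ minsize then
            [((PySem.List.bisectLeft x (start + i * step) : Int),
              max 0 ((PySem.List.bisectLeft x (start + i * step + size) : Int) - 1),
              start + i * step, start + i * step + size)]
          else []) := by
  intro f
  set nwin : Int := (if endv - start - size ≤ 0 then 0 else -(PySem.Int.floordiv (-(endv - start - size)) step)) with hnwin
  induction f with
  | zero =>
    intro k hk hf
    rw [PySem.List.pyRange_one_eq_nil (by omega)]
    rfl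
  | succ f ih =>
    intro k hk hf
    have hguard := guard_iff_lt_nwin (endv - start - size) step hstep k hk
    obtain ⟨bh1, bh2, bh3⟩ := PySem.List.bisectLeft_spec x (start + k * step + size) hs
    by_cases hklt : k < nwin
    · -- guard is true: one window is examined, then the loop continues at k+1
      have hhigh : start + k * step + size < endv := by
        have := hguard.mpr (by omega)
        omega
      obtain ⟨bl1, _, _⟩ := PySem.List.bisectLeft_spec x (start + k * step) hs
      -- low pointer: restarting the scan at the previous bisect point lands at the fresh bisect
      have hlow : loopLowA x (start + (k + 1) * step) (PySem.List.bisectLeft x (start + k * step)) =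
          PySem.List.bisectLeft x (start + (k + 1) * step) := by
        rw [loopLowA_eq_max x _ hs _ bl1]
        have := bisectLeft_mono x hs (v := start + k * step) (w := start + (k + 1) * step) (by nlinarith)
        omega
      -- high pointer: likewise, via loopHighA_succ
      have hhigh' : loopHighA x (start + (k + 1) * step + size)
            (PySem.List.bisectLeft x (start + k * step + size) - 1) =
          (PySem.List.bisectLeft x (start + (k + 1) * step + size) - 1) := by
        have hmono := bisectLeft_mono x hs
          (v := start + k * step + size) (w := start + (k + 1) * step + size) (by nlinarith)
        obtain ⟨bh1', _, _⟩ := PySem.List.bisectLeft_spec x (start + (k + 1) * step + size) hs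
        by_cases hbz : PySem.List.bisectLeft x (start + k * step + size) = 0
        · -- previous bisect was 0: previous highi = 0, scan restarts at index 1
          rw [hbz]
          show loopHighA x (start + (k + 1) * step + size) 0 = _
          have hsucc := loopHighA_succ x (start + (k + 1) * step + size) 0
          rw [loopLowA_eq_max x _ hs (0 + 1) (by omega)] at hsucc
          omega
        · -- previous bisect ≥ 1: previous highi = bisect - 1, scan restarts at bisect
          have hb1 : 1 ≤ PySem.List.bisectLeft x (start + k * step + size) := by omega
          have hsucc := loopHighA_succ x (start + (k + 1) * step + size)
            (PySem.List.bisectLeft x (start + k * step + size) - 1)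
          have hstmax : (PySem.List.bisectLeft x (start + k * step + size) - 1) + 1 =
              PySem.List.bisectLeft x (start + k * step + size) := by omega
          rw [hstmax, loopLowA_eq_max x _ hs _ bh1] at hsucc
          omega
      have hhighi_cast : (((PySem.List.bisectLeft x (start + k * step + size) - 1 : Nat)) : Int) =
          max 0 ((PySem.List.bisectLeft x (start + k * step + size) : Int) - 1) := by omega
      have htail := ih (k + 1) (by omega) (by omega)
      rw [outerA, if_pos ⟨by omega, hhigh⟩,
        PySem.List.pyRange_one_cons (by omega), List.flatMap_cons,
        hlow, hhigh', htail, hhighi_cast]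
    · -- guard is false: both sides are empty
      have hhigh : ¬ (start + k * step + size < endv) := by
        intro hc
        exact hklt (hguard.mp (by omega))
      rw [outerA, if_neg (fun hc => hhigh hc.2),
        PySem.List.pyRange_one_eq_nil (by omega), List.flatMap_nil]

-- ===== VERDICT (by name: the statement is the Claim_ definition above) =====
theorem iter_window_index_step_spec : Claim_equal_iter_window_index_step := by
  intro x size step minsize _ hpre
  obtain ⟨hne, hcase⟩ := hpre
  unfold Spec_iter_window_index_step
  cases x with
  | nil => exact absurd rfl hne
  | cons a xs =>
    simp only [iter_window_index_step, iter_window_index_step_alt]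
    set start := (a :: xs).getD 0 0 with hstart
    set endv := (a :: xs).getD ((a :: xs).length - 1) 0 with hendv
    rcases hcase with htriv | ⟨hsort, hstep⟩
    · -- end ≤ start + size: A's loop body never runs, B's window count is 0
      have hA : outerA (a :: xs) size step minsize endv start
          ((endv - start - size).toNat + 2) start (start + size) 1 0
          (loopHighA (a :: xs) (start + size) 0) = [] := by
        rw [outerA, if_neg]
        intro hc
        omega
      have hB : (if endv - start - size ≤ 0 then 0
          else -(PySem.Int.floordiv (-(endv - start - size)) step)) = (0 : Int) := by
        rw [if_pos (by omega)]
      rw [hA]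
      simp only [hB, PySem.List.pyRange_one_eq_nil (le_refl (0:Int)), List.flatMap_nil]
    · -- sorted, step > 0: align A's initial state with B's window-0 bisect values
      have hlen : 0 < (a :: xs).length := by simp
      have hinit_low : (0 : Nat) = PySem.List.bisectLeft (a :: xs) start := by
        rw [hstart, bisectLeft_first (a :: xs) hsort hlen]
      have hinit_high : loopHighA (a :: xs) (start + size) 0 =
          (PySem.List.bisectLeft (a :: xs) (start + size) - 1) := by
        have hsucc := loopHighA_succ (a :: xs) (start + size) 0
        rw [loopLowA_eq_max (a :: xs) _ hsort 1 (by omega)] at hsucc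
        obtain ⟨b1, _, _⟩ := PySem.List.bisectLeft_spec (a :: xs) (start + size) hsort
        omega
      have hfuel : (if endv - start - size ≤ 0 then 0
            else -(PySem.Int.floordiv (-(endv - start - size)) step)) ≤
          (0 : Int) + (((endv - start - size).toNat + 2 : Nat) : Int) := by
        have := nwin_le_span (endv - start - size) step hstep
        push_cast
        omega
      have hmain := outer_eq_flatMap (a :: xs) size step minsize endv start hsort hstep hlen
        hstart ((endv - start - size).toNat + 2) 0 (le_refl 0) hfuel
      simp only [zero_mul, add_zero, zero_add] at hmain
      rw [← hinit_low] at hmain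
      rw [hinit_high]
      exact hmain
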